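-- pv_equiv track=rewrite | github.com/OUTCITE/outcite-duplicate_detecting | code/3_index_duplicates.py | best_url
-- ===== SOURCE A (Python) =====
-- _priority = ['sowiport','crossref','dnb','openalex','bing'];
--
-- def best_url(references):
--     url  = None;
--     urls = {target_collection:[reference[target_collection+'_url'] for reference in references if target_collection+'_url' in reference and reference[target_collection+'_url']] for target_collection in _priority}
--     maxs = {target_collection:max(urls[target_collection],key=urls[target_collection].count) for target_collection in urls if urls[target_collection]};
--     for target_collection in _priority:
--         if target_collection in maxs:
--             return target_collection, maxs[target_collection];
--     return None, None
-- ===== SOURCE B (Python) =====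
-- _priority = ['sowiport','crossref','dnb','openalex','bing']
--
-- def _mode(urls):
--     # recursive mode: strip every occurrence of the head url and recurse on the
--     # remainder; the head wins ties (>=), so the first-occurring url with a
--     # maximal count is returned -- exactly Python's max(l, key=l.count)
--     if not urls:
--         return None, 0
--     head = urls[0]
--     rest = [u for u in urls if u != head]
--     c = len(urls) - len(rest)
--     m, mc = _mode(rest)
--     return (head, c) if mc <= c else (m, mc)
--
-- def best_url(references):
--     # lazy scan: walk the priority list and stop at the first source that has
--     # any non-empty url; only that source's urls are ever collected or counted
--     for src in _priority:
--         key = src + '_url'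
--         urls = [r[key] for r in references if r.get(key)]
--         if urls:
--             return src, _mode(urls)[0]
--     return None, None
-- ===== Notes on version B (the rewrite author's own statement) =====
-- stated objective: alternative
-- what changed: A eagerly builds a url list for every priority source plus a dict of modes computed via max(l, key=l.count), then scans _priority; B lazily walks _priority, stops at the first source with any non-empty url, and computes that single source's mode by a recursive strip-the-head partition (head wins ties), never touching lower-priority sources.
import Mathlib
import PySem

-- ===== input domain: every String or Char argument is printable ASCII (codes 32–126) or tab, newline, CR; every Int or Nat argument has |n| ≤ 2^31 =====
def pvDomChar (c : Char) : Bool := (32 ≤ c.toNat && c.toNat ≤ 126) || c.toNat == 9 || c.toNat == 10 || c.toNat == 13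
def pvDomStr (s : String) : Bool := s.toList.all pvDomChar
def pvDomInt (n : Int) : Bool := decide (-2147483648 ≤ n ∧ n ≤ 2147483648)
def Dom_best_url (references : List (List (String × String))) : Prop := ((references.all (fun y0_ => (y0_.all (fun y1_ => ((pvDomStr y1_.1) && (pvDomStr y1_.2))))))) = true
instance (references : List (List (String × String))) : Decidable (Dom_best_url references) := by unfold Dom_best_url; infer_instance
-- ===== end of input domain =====

-- B (alternative): A eagerly builds url lists and modes for every priority source; B lazily
-- scans the priority list, stopping at the first source with a non-empty url, and computes
-- only that source's mode by a recursive strip-the-head partition (head wins ties).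

-- ===== PORT A =====
def pvPriority : List String := ["sowiport", "crossref", "dnb", "openalex", "bing"]

-- one element of A's list comprehension: reference[k] if k in reference and reference[k] is truthy
def pvEntry (tc : String) (reference : List (String × String)) : Option String :=
  match (PySem.Dict.mk reference).get? (tc ++ "_url") with
  | some v => if v ≠ "" then some v else none
  | none => none

def pvUrls (references : List (List (String × String))) (tc : String) : List String :=
  references.filterMap (pvEntry tc)

-- max(l, key=l.count); the none branch is unreachable (A only applies it to nonempty lists)
def pvMaxByCount (l : List String) : String :=
  match PySem.List.max? l (fun x => (l.count x : Int)) with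
  | some m => m
  | none => ""

-- A's final loop over _priority
def pvFindA (maxs : PySem.Dict String String) : List String → Option String × Option String
  | [] => (none, none)
  | tc :: rest => if maxs.contains tc then (some tc, maxs.get? tc) else pvFindA maxs rest

def best_url (references : List (List (String × String))) : Option String × Option String :=
  let urls : PySem.Dict String (List String) :=
    PySem.Dict.mk (pvPriority.map (fun tc => (tc, pvUrls references tc)))
  let maxs : PySem.Dict String String :=
    PySem.Dict.mk (urls.items.filterMap (fun p => if p.2 ≠ [] then some (p.1, pvMaxByCount p.2) else none))
  pvFindA maxs pvPriority

-- ===== PORT B =====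
-- B's recursive mode: strip every occurrence of the head and recurse on the remainder;
-- the head wins ties, so the first-occurring url with a maximal count is returned
def pvMode : List String → Option String × Int
  | [] => (none, 0)
  | head :: t =>
    let rest := (head :: t).filter (fun u => u != head)
    let c : Int := ((head :: t).length : Int) - (rest.length : Int)
    let m := pvMode rest
    if m.2 ≤ c then (some head, c) else m
  termination_by l => l.length
  decreasing_by
    simp only [List.filter_cons, bne_self_eq_false, Bool.false_eq_true, if_false, List.length_cons]
    exact Nat.lt_succ_of_le (List.length_filter_le _ t)

-- B's lazy scan over the priority list
def pvSelect (references : List (List (String × String))) : List String → Option String × Option String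
  | [] => (none, none)
  | src :: more =>
    let urls := references.filterMap (fun r =>
      match (PySem.Dict.mk r).get? (src ++ "_url") with
      | some v => if v ≠ "" then some v else none
      | none => none)
    if urls ≠ [] then (some src, (pvMode urls).1) else pvSelect references more

def best_url_alt (references : List (List (String × String))) : Option String × Option String :=
  pvSelect references pvPriority

-- ===== PRECONDITION & SPEC =====
def Spec_best_url (references : List (List (String × String))) (out : Option String × Option String) : Prop := out = best_url_alt references
instance (references : List (List (String × String))) (out : Option String × Option String) : Decidable (Spec_best_url references out) := by unfold Spec_best_url; infer_instance

-- ===== CLAIM =====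
def Claim_equal_best_url : Prop := ∀ (references : List (List (String × String))), Dom_best_url references → Spec_best_url references (best_url references)

-- ===== LEMMAS AND PROOFS =====

theorem pv_any_eq_isSome_find {ν : Type} (k : String) :
    ∀ l : List (String × ν), (l.any fun q => q.1 == k) = (l.find? fun q => q.1 == k).isSome := by
  intro l
  induction l with
  | nil => rfl
  | cons p t ih => cases h : p.1 == k <;> simp [List.find?_cons, h, ih]

theorem pv_contains_eq_isSome {ν : Type} (d : PySem.Dict String ν) (k : String) :
    d.contains k = (d.get? k).isSome := by
  cases d with
  | mk l =>
    show (l.any fun q => q.1 == k) = (Option.map (fun x => x.2) (l.find? fun q => q.1 == k)).isSome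
    rw [pv_any_eq_isSome_find k l]
    cases l.find? fun q => q.1 == k <;> rfl

theorem pv_priority_nodup : pvPriority.Nodup := by decide

-- ----- the A-side dict of modes, looked up at a priority key -----

theorem pv_getA_not_mem (f : String → List String) (s : String) :
    ∀ ps : List String, s ∉ ps →
      (PySem.Dict.mk ((ps.map (fun tc => (tc, f tc))).filterMap
        (fun p => if p.2 ≠ [] then some (p.1, pvMaxByCount p.2) else none))).get? s = none := by
  intro ps
  induction ps with
  | nil => intro _; rfl
  | cons t rest ih =>
    intro h
    have hne : (t == s) = false := beq_eq_false_iff_ne.mpr (fun he => h (by simp [he]))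
    have hrest : s ∉ rest := fun hm => h (by simp [hm])
    by_cases hf : f t = []
    · simpa [List.filterMap_cons, hf] using ih hrest
    · simpa [List.filterMap_cons, hf, PySem.Dict.get?_mk_cons, hne] using ih hrest

theorem pv_getA (f : String → List String) (s : String) :
    ∀ ps : List String, ps.Nodup → s ∈ ps →
      (PySem.Dict.mk ((ps.map (fun tc => (tc, f tc))).filterMap
        (fun p => if p.2 ≠ [] then some (p.1, pvMaxByCount p.2) else none))).get? s
      = if f s ≠ [] then some (pvMaxByCount (f s)) else none := by
  intro ps
  induction ps with
  | nil => intro _ h; cases h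
  | cons t rest ih =>
    intro hnd hs
    have hnd' : rest.Nodup := (List.nodup_cons.mp hnd).2
    have htrest : t ∉ rest := (List.nodup_cons.mp hnd).1
    rcases List.mem_cons.mp hs with he | hm
    · subst he
      by_cases hf : f s = []
      · simpa [List.filterMap_cons, hf] using pv_getA_not_mem f s rest htrest
      · simp [List.filterMap_cons, hf, PySem.Dict.get?_mk_cons]
    · have hne : (t == s) = false := beq_eq_false_iff_ne.mpr (fun he => htrest (he ▸ hm))
      by_cases hf : f t = []
      · simpa [List.filterMap_cons, hf] using ih hnd' hm
      · simpa [List.filterMap_cons, hf, PySem.Dict.get?_mk_cons, hne] using ih hnd' hm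

-- ----- the strict-max foldl behind PySem.List.max? -----

def pvG (key : String → Int) (acc : Option String) (x : String) : Option String :=
  match acc with
  | none => some x
  | some m => if key m < key x then some x else some m

theorem pv_max?_eq_foldl (l : List String) (key : String → Int) :
    PySem.List.max? l key = l.foldl (pvG key) none := by
  unfold PySem.List.max?
  congr 1
  funext acc x
  cases acc <;> rfl

theorem pv_fold_all_le (key : String → Int) :
    ∀ (t : List String) (a : String), (∀ x ∈ t, key x ≤ key a) →
      t.foldl (pvG key) (some a) = some a := by
  intro t
  induction t with
  | nil => intro _ _; rfl
  | cons x xs ih =>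
    intro a h
    have hx : ¬ key a < key x := not_lt.mpr (h x (by simp))
    simp only [List.foldl_cons, pvG, if_neg hx]
    exact ih a (fun y hy => h y (by simp [hy]))

theorem pv_fold_drop (key : String → Int) (p : String → Bool) :
    ∀ (t : List String) (a : String), (∀ x ∈ t, p x = false → key x ≤ key a) →
      t.foldl (pvG key) (some a) = (t.filter p).foldl (pvG key) (some a) := by
  intro t
  induction t with
  | nil => intro _ _; rfl
  | cons x xs ih =>
    intro a h
    cases hp : p x with
    | false =>
      have hx : ¬ key a < key x := not_lt.mpr (h x (by simp) hp)
      simp only [List.foldl_cons, List.filter_cons, hp, Bool.false_eq_true, if_false, pvG, if_neg hx]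
      exact ih a (fun y hy hpy => h y (by simp [hy]) hpy)
    | true =>
      simp only [List.foldl_cons, List.filter_cons, hp, if_true, pvG]
      by_cases hlt : key a < key x
      · simp only [if_pos hlt]
        exact ih x (fun y hy hpy => le_of_lt (lt_of_le_of_lt (h y (by simp [hy]) hpy) hlt))
      · simp only [if_neg hlt]
        exact ih a (fun y hy hpy => h y (by simp [hy]) hpy)

theorem pv_fold_start_irrel (key : String → Int) :
    ∀ (rs : List String) (a b : String), key b ≤ key a → (∃ x ∈ rs, key a < key x) →
      rs.foldl (pvG key) (some a) = rs.foldl (pvG key) (some b) := by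
  intro rs
  induction rs with
  | nil => intro a b _ h; obtain ⟨x, hx, _⟩ := h; cases hx
  | cons y ys ih =>
    intro a b hba hw
    obtain ⟨x, hx, hax⟩ := hw
    by_cases hy : key a < key y
    · have hby : key b < key y := lt_of_le_of_lt hba hy
      simp only [List.foldl_cons, pvG, if_pos hy, if_pos hby]
    · have hxy : x ≠ y := fun he => hy (he ▸ hax)
      have hxys : x ∈ ys := by
        rcases List.mem_cons.mp hx with he | hm
        · exact absurd he hxy
        · exact hm
      have hya : key y ≤ key a := not_lt.mp hy
      simp only [List.foldl_cons, pvG, if_neg hy]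
      by_cases hby : key b < key y
      · simp only [if_pos hby]
        exact ih a y hya ⟨x, hxys, hax⟩
      · simp only [if_neg hby]
        exact ih a b hba ⟨x, hxys, hax⟩

theorem pv_fold_none_eq_some (key : String → Int) (rs : List String) (a : String)
    (hw : ∃ x ∈ rs, key a < key x) :
    rs.foldl (pvG key) none = rs.foldl (pvG key) (some a) := by
  cases rs with
  | nil => obtain ⟨x, hx, _⟩ := hw; cases hx
  | cons y ys =>
    obtain ⟨x, hx, hax⟩ := hw
    by_cases hy : key a < key y
    · simp only [List.foldl_cons, pvG, if_pos hy]
    · have hxy : x ≠ y := fun he => hy (he ▸ hax)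
      have hxys : x ∈ ys := by
        rcases List.mem_cons.mp hx with he | hm
        · exact absurd he hxy
        · exact hm
      simp only [List.foldl_cons, pvG, if_neg hy]
      exact (pv_fold_start_irrel key ys a y (not_lt.mp hy) ⟨x, hxys, hax⟩).symm

theorem pv_fold_congr (key1 key2 : String → Int) :
    ∀ (rs : List String), (∀ x ∈ rs, key1 x = key2 x) →
      ∀ (o : Option String), (∀ a, o = some a → key1 a = key2 a) →
        rs.foldl (pvG key1) o = rs.foldl (pvG key2) o := by
  intro rs
  induction rs with
  | nil => intro _ _ _; rfl
  | cons y ys ih =>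
    intro h o ho
    have hy : key1 y = key2 y := h y (by simp)
    have hstep : pvG key1 o y = pvG key2 o y := by
      cases o with
      | none => rfl
      | some a => simp [pvG, ho a rfl, hy]
    simp only [List.foldl_cons, hstep]
    refine ih (fun x hx => h x (by simp [hx])) _ ?_
    intro a ha
    cases o with
    | none =>
      have hya : y = a := by simpa [pvG] using ha
      exact hya ▸ hy
    | some b =>
      by_cases hlt : key2 b < key2 y
      · have hya : y = a := by simpa [pvG, hlt] using ha
        exact hya ▸ hy
      · have hba2 : b = a := by simpa [pvG, hlt] using ha
        exact hba2 ▸ ho b rfl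

-- ----- counting facts for the strip-the-head recursion -----

theorem pv_length_filter_ne (h : String) (l : List String) :
    l.length = (l.filter (fun u => u != h)).length + l.count h := by
  induction l with
  | nil => rfl
  | cons x xs ih =>
    by_cases hx : x = h
    · subst hx
      simp only [List.filter_cons, bne_self_eq_false, Bool.false_eq_true, if_false,
        List.count_cons_self, List.length_cons, ih]
      omega
    · have hbne : (x != h) = true := bne_iff_ne.mpr hx
      have hbeq : (x == h) = false := beq_eq_false_iff_ne.mpr hx
      simp only [List.filter_cons, hbne, if_true, List.length_cons, List.count_cons, hbeq,
        ih, Bool.false_eq_true, if_false]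
      omega

theorem pv_count_filter_ne (h x : String) (l : List String) (hx : x ≠ h) :
    (l.filter (fun u => u != h)).count x = l.count x := by
  induction l with
  | nil => rfl
  | cons y ys ih =>
    by_cases hy : y = h
    · subst hy
      rw [List.filter_cons]
      simp only [bne_self_eq_false, Bool.false_eq_true, if_false, ih]
      rw [List.count_cons]
      simp [beq_eq_false_iff_ne.mpr hx, Ne.symm hx]
    · have hbne : (y != h) = true := bne_iff_ne.mpr hy
      simp only [List.filter_cons, hbne, if_true, List.count_cons, ih]

-- ----- pvMode computes (first mode, its count) -----

theorem pv_mode_eq : ∀ (n : Nat) (l : List String), l.length ≤ n →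
    pvMode l = (match PySem.List.max? l (fun x => (l.count x : Int)) with
                | none => (none, 0)
                | some m => (some m, (l.count m : Int))) := by
  intro n
  induction n with
  | zero =>
    intro l hl
    have : l = [] := List.length_eq_zero_iff.mp (Nat.le_zero.mp hl)
    subst this
    simp [pvMode, pv_max?_eq_foldl]
  | succ n ih =>
    intro l hl
    cases l with
    | nil => simp [pvMode, pv_max?_eq_foldl]
    | cons h t =>
      have hrest_eq : (h :: t).filter (fun u => u != h) = t.filter (fun u => u != h) := by
        simp
      set rest := (h :: t).filter (fun u => u != h) with hrest
      have hrlen : rest.length ≤ n := by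
        rw [hrest_eq]
        exact le_trans (List.length_filter_le _ t) (Nat.succ_le_succ_iff.mp hl)
      have hcount : ((h :: t).length : Int) - (rest.length : Int) = ((h :: t).count h : Int) := by
        have hlen := pv_length_filter_ne h (h :: t)
        rw [← hrest] at hlen
        omega
      have hkeys : ∀ x ∈ rest, (rest.count x : Int) = ((h :: t).count x : Int) := by
        intro x hx
        have hxne : x ≠ h := by
          have := List.of_mem_filter hx
          exact bne_iff_ne.mp this
        rw [pv_count_filter_ne h x (h :: t) hxne]
      have hmode : pvMode (h :: t)
          = if (pvMode rest).2 ≤ ((h :: t).length : Int) - (rest.length : Int)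
            then (some h, ((h :: t).length : Int) - (rest.length : Int)) else pvMode rest := by
        rw [pvMode]
      have hfold : PySem.List.max? (h :: t) (fun x => ((h :: t).count x : Int))
          = rest.foldl (pvG (fun x => ((h :: t).count x : Int))) (some h) := by
        rw [pv_max?_eq_foldl]
        simp only [List.foldl_cons]
        have h1 : pvG (fun x => ((h :: t).count x : Int)) none h = some h := rfl
        rw [h1, hrest_eq]
        exact pv_fold_drop _ (fun u => u != h) t h (by
          intro x hx hpx
          have : x = h := by
            have := bne_eq_false_iff_eq.mp hpx
            exact this
          rw [this])
      by_cases hall : ∀ x ∈ rest, ((h :: t).count x : Int) ≤ ((h :: t).count h : Int)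
      · -- head is a mode: A's max? returns the head, B keeps it via the tie rule
        have hmax : PySem.List.max? (h :: t) (fun x => ((h :: t).count x : Int)) = some h := by
          rw [hfold]
          exact pv_fold_all_le _ rest h hall
        have hle : (pvMode rest).2 ≤ ((h :: t).length : Int) - (rest.length : Int) := by
          rw [ih rest hrlen]
          cases hmr : PySem.List.max? rest (fun x => (rest.count x : Int)) with
          | none =>
            have hpos : 0 < (h :: t).count h := List.count_pos_iff.mpr (by simp)
            simp only []
            omega
          | some m =>
            have hmem : m ∈ rest := PySem.List.max?_mem hmr
            simp only []
            rw [hkeys m hmem] at *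
            have := hall m hmem
            omega
        rw [hmode, if_pos hle, hmax, hcount]
      · rw [not_forall] at hall
        obtain ⟨x, hx⟩ := hall
        rw [Classical.not_imp, not_le] at hx
        obtain ⟨hxrest, hxgt⟩ := hx
        have hw : ∃ y ∈ rest, ((h :: t).count h : Int) < ((h :: t).count y : Int) := ⟨x, hxrest, hxgt⟩
        have hmax : PySem.List.max? (h :: t) (fun y => ((h :: t).count y : Int))
            = PySem.List.max? rest (fun y => (rest.count y : Int)) := by
          rw [hfold, ← pv_fold_none_eq_some _ rest h hw, pv_max?_eq_foldl]
          exact pv_fold_congr _ _ rest (fun y hy => (hkeys y hy).symm) none (by intro a ha; cases ha)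
        cases hmr : PySem.List.max? rest (fun y => (rest.count y : Int)) with
        | none =>
          exact absurd ((PySem.List.max?_eq_none_iff _ _).mp hmr) (by
            intro he; rw [he] at hxrest; cases hxrest)
        | some m =>
          have hmem : m ∈ rest := PySem.List.max?_mem hmr
          have hxle : ((h :: t).count x : Int) ≤ ((h :: t).count m : Int) := by
            have := PySem.List.max?_isMax hmr x hxrest
            rw [hkeys x hxrest, hkeys m hmem] at this
            exact this
          have hgt : ¬ (pvMode rest).2 ≤ ((h :: t).length : Int) - (rest.length : Int) := by
            rw [ih rest hrlen, hmr]
            simp only []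
            rw [hkeys m hmem, hcount]
            omega
          rw [hmode, if_neg hgt, hmax, hmr, ih rest hrlen, hmr]
          simp only []
          rw [hkeys m hmem]

-- ----- assembling both programs -----

def pvMaxsOf (refs : List (List (String × String))) : PySem.Dict String String :=
  PySem.Dict.mk ((pvPriority.map (fun tc => (tc, pvUrls refs tc))).filterMap
    (fun p => if p.2 ≠ [] then some (p.1, pvMaxByCount p.2) else none))

theorem pv_some_maxByCount {l : List String} (h : l ≠ []) :
    some (pvMaxByCount l) = PySem.List.max? l (fun x => (l.count x : Int)) := by
  unfold pvMaxByCount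
  cases hm : PySem.List.max? l (fun x => (l.count x : Int)) with
  | none => exact absurd ((PySem.List.max?_eq_none_iff _ _).mp hm) h
  | some m => rfl

theorem pv_mode_fst {l : List String} (h : l ≠ []) :
    (pvMode l).1 = PySem.List.max? l (fun x => (l.count x : Int)) := by
  rw [pv_mode_eq l.length l (le_refl _)]
  cases hm : PySem.List.max? l (fun x => (l.count x : Int)) with
  | none => exact absurd ((PySem.List.max?_eq_none_iff _ _).mp hm) h
  | some m => rfl

theorem pv_find_eq (refs : List (List (String × String))) :
    ∀ ps : List String, (∀ s ∈ ps, s ∈ pvPriority) →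
      pvFindA (pvMaxsOf refs) ps = pvSelect refs ps := by
  intro ps
  induction ps with
  | nil => intro _; rfl
  | cons s rest ih =>
    intro h
    have hs : s ∈ pvPriority := h s (by simp)
    have hA : (pvMaxsOf refs).get? s
        = if pvUrls refs s ≠ [] then some (pvMaxByCount (pvUrls refs s)) else none :=
      pv_getA (pvUrls refs) s pvPriority pv_priority_nodup hs
    have hurls : refs.filterMap (fun r =>
        match (PySem.Dict.mk r).get? (s ++ "_url") with
        | some v => if v ≠ "" then some v else none
        | none => none) = pvUrls refs s := rfl
    simp only [pvFindA, pvSelect, hurls]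
    cases hl : pvUrls refs s with
    | nil =>
      rw [hl] at hA
      simp only [ne_eq, not_true_eq_false, ite_false] at hA
      have hca : (pvMaxsOf refs).contains s = false := by
        rw [pv_contains_eq_isSome, hA]; rfl
      rw [hca]
      simp only [Bool.false_eq_true, ite_false, ne_eq, not_true_eq_false, ite_false]
      exact ih (fun x hx => h x (by simp [hx]))
    | cons u t =>
      rw [hl] at hA
      simp only [ne_eq, reduceCtorEq, not_false_eq_true, ite_true] at hA
      have hca : (pvMaxsOf refs).contains s = true := by
        rw [pv_contains_eq_isSome, hA]; rfl
      have hne : u :: t ≠ [] := List.cons_ne_nil u t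
      rw [hca]
      simp only [ite_true, ne_eq, reduceCtorEq, not_false_eq_true]
      rw [hA, pv_some_maxByCount hne, ← pv_mode_fst hne]

theorem pv_best_url_eq (refs : List (List (String × String))) :
    best_url refs = pvFindA (pvMaxsOf refs) pvPriority := rfl

-- ===== VERDICT (by name: the statement is the Claim_ definition above) =====
theorem best_url_spec : Claim_equal_best_url := by
  intro refs _
  show best_url refs = best_url_alt refs
  rw [pv_best_url_eq, best_url_alt]
  exact pv_find_eq refs pvPriority (fun s hs => hs)
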